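-- pv_equiv track=rewrite | github.com/lobolauren/Undergrad-Calendar-Website | scraper.py | get_hs_course
-- ===== SOURCE A (Python) =====
-- def get_hs_course(prereq_text=""):
--     course_li = prereq_text.split(" ")
--
--     hs_courses = []
--     # for every word
--     for i, el in enumerate(course_li):
--         if "4U" in el:
--             j = i
--             temp_str = ''
--             # go through the list and build the course string until it is over
--             while j < len(course_li) and course_li[j] != "or":
--
--                 temp_str += course_li[j] + ' '
--                 # if there is a comma, the course string is done, but still include that word
--                 if ',' in course_li[j]:
--                     break
--
--                 j += 1
--             # get rid of unwanted characters
--             temp_str = ((temp_str.replace('(', '')).replace(')','')).replace(',', '')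
--             hs_courses.append(temp_str)
--
--     return hs_courses
-- ===== SOURCE B (Python) =====
-- def get_hs_course(prereq_text=""):
--     course_li = prereq_text.split(" ")
--     n = len(course_li)
--     # end[i] = exclusive end of the course segment starting at word i, built in one reverse pass
--     end = [0] * (n + 1)
--     end[n] = n
--     for i in range(n - 1, -1, -1):
--         if ',' in course_li[i]:
--             end[i] = i + 1
--         elif course_li[i] == 'or':
--             end[i] = i
--         else:
--             end[i] = end[i + 1]
--     hs_courses = []
--     for i in range(n):
--         if '4U' in course_li[i]:
--             temp_str = ''.join(w + ' ' for w in course_li[i:end[i]])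
--             hs_courses.append(temp_str.replace('(', '').replace(')', '').replace(',', ''))
--     return hs_courses
-- ===== Notes on version B (the rewrite author's own statement) =====
-- stated objective: alternative
-- what changed: Replaces A's per-hit forward while-scan with one reverse pass that precomputes a segment-end table end[i], then a single forward pass that slices course_li[i:end[i]] and joins.
import Mathlib
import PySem

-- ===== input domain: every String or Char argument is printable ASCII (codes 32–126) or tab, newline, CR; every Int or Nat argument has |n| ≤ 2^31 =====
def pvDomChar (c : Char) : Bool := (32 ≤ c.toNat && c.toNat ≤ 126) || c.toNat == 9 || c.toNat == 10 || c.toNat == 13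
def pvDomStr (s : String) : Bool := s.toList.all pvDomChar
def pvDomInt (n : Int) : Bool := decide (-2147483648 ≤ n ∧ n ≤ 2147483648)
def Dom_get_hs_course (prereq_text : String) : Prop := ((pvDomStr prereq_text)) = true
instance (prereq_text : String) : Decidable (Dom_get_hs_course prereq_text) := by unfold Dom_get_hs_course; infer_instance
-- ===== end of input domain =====

-- B replaces A's nested per-hit forward while-scans by one reverse pass building a
-- segment-end table plus a single forward pass that slices; objective: alternative decomposition.

-- ===== PORT A =====
-- the unwanted-character cleaning shared by both Pythons (same three .replace calls)
def pvClean (cs : List Char) : List Char :=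
  PySem.Chars.replace (PySem.Chars.replace (PySem.Chars.replace cs ['('] []) [')'] []) [','] []

-- A's inner while loop from position j, written as recursion on the suffix course_li[j:]
def aBuild : List (List Char) → List Char
  | [] => []
  | w :: rest =>
    if w = ['o', 'r'] then []
    else if PySem.Chars.isIn [','] w then w ++ [' ']
    else (w ++ [' ']) ++ aBuild rest

-- A's outer for loop: at each position, if "4U" in the word, run the inner while loop from there
def aOuter : List (List Char) → List String
  | [] => []
  | w :: rest =>
    (if PySem.Chars.isIn ['4', 'U'] w then [String.ofList (pvClean (aBuild (w :: rest)))] else [])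
      ++ aOuter rest

def get_hs_course (prereq_text : String) : List String :=
  aOuter (PySem.Chars.splitOn prereq_text.toList [' '])

-- ===== PORT B =====
-- B's reverse pass: bEnds ws i = the table end[i:], with end[i]=i+1 on a comma word,
-- i on "or", else end[i+1] (end[n]=n)
def bEnds : List (List Char) → Nat → List Nat
  | [], _ => []
  | w :: rest, i =>
    let tail := bEnds rest (i + 1)
    let nxt := match tail with | [] => i + 1 | e :: _ => e
    (if PySem.Chars.isIn [','] w then i + 1
     else if w = ['o', 'r'] then i
     else nxt) :: tail

-- ''.join(w + ' ' for w in seg)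
def bJoin (seg : List (List Char)) : List Char := (seg.map (· ++ [' '])).flatten

-- B's forward pass over the words paired with their end table
def bLoop : List (List Char) → List Nat → Nat → List String
  | w :: ws, e :: es, i =>
    (if PySem.Chars.isIn ['4', 'U'] w
     then [String.ofList (pvClean (bJoin ((w :: ws).take (e - i))))] else [])
      ++ bLoop ws es (i + 1)
  | _, _, _ => []

def get_hs_course_alt (prereq_text : String) : List String :=
  let words := PySem.Chars.splitOn prereq_text.toList [' ']
  bLoop words (bEnds words 0) 0

-- ===== PRECONDITION & SPEC =====
def Spec_get_hs_course (prereq_text : String) (out : List String) : Prop := out = get_hs_course_alt prereq_text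
instance (prereq_text : String) (out : List String) : Decidable (Spec_get_hs_course prereq_text out) := by unfold Spec_get_hs_course; infer_instance

-- ===== CLAIM (what is proved, stated in full; the proofs are below) =====
def Claim_equal_get_hs_course : Prop := ∀ (prereq_text : String), Dom_get_hs_course prereq_text → Spec_get_hs_course prereq_text (get_hs_course prereq_text)

-- ===== LEMMAS AND PROOFS =====

-- head of the end table, defaulting to i for the empty suffix (end[n] = n)
def headE (ws : List (List Char)) (i : Nat) : Nat := (bEnds ws i).headD i

theorem le_headE (ws : List (List Char)) (i : Nat) : i ≤ headE ws i := by
  induction ws generalizing i with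
  | nil => simp [headE, bEnds]
  | cons w rest ih =>
    simp only [headE, bEnds, List.headD_cons]
    split_ifs with h1 h2
    · omega
    · omega
    · cases hrec : bEnds rest (i + 1) with
      | nil =>
        have h2 : (match ([] : List Nat) with | [] => i + 1 | e :: _ => e) = i + 1 := rfl
        rw [h2]
        omega
      | cons e tl =>
        have h2 : (match e :: tl with | [] => i + 1 | e' :: _ => e') = e := rfl
        rw [h2]
        have := ih (i + 1)
        simp [headE, hrec] at this
        omega

theorem aBuild_eq_slice (ws : List (List Char)) (i : Nat) :
    aBuild ws = bJoin (ws.take (headE ws i - i)) := by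
  induction ws generalizing i with
  | nil => simp [aBuild, bJoin]
  | cons w rest ih =>
    simp only [headE, bEnds, List.headD_cons]
    by_cases hc : PySem.Chars.isIn [','] w = true
    · have hor : ¬ w = ['o', 'r'] := by
        rintro rfl; revert hc; decide
      simp only [hc, if_true, if_neg hor, aBuild]
      have : i + 1 - i = 1 := by omega
      simp [this, bJoin]
    · by_cases ho : w = ['o', 'r']
      · subst ho
        have hno : PySem.Chars.isIn [','] ['o', 'r'] = false := by decide
        simp [aBuild, hno, bJoin]
      · simp only [hc, if_neg ho, aBuild]
        cases hrec : bEnds rest (i + 1) with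
        | nil =>
          have hr : rest = [] := by
            cases rest with
            | nil => rfl
            | cons a b => simp [bEnds] at hrec
          subst hr
          have : i + 1 - i = 1 := by omega
          simp [aBuild, this, bJoin]
        | cons e tl =>
          have he : e = headE rest (i + 1) := by simp [headE, hrec]
          have hle : i + 1 ≤ e := he ▸ le_headE rest (i + 1)
          have h1 : e - i = (e - (i + 1)) + 1 := by omega
          have h2 : (match e :: tl with | [] => i + 1 | e' :: _ => e') = e := rfl
          rw [h2]
          simp only [Bool.false_eq_true, if_false]
          rw [h1, List.take_succ_cons]
          simp only [bJoin, List.map_cons, List.flatten_cons]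
          rw [ih (i + 1), he]
          simp [bJoin]

theorem aOuter_eq_bLoop (ws : List (List Char)) (i : Nat) :
    aOuter ws = bLoop ws (bEnds ws i) i := by
  induction ws generalizing i with
  | nil => simp [aOuter, bLoop]
  | cons w rest ih =>
    simp only [aOuter, bEnds, bLoop]
    rw [ih (i + 1)]
    congr 1
    have he : (if PySem.Chars.isIn [','] w then i + 1
        else if w = ['o', 'r'] then i
        else match bEnds rest (i + 1) with | [] => i + 1 | e :: _ => e)
        = headE (w :: rest) i := by
      simp [headE, bEnds]
    rw [he, ← aBuild_eq_slice (w :: rest) i]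

-- ===== VERDICT (by name: the statement is the Claim_ definition above) =====
theorem get_hs_course_spec : Claim_equal_get_hs_course := by
  intro s _
  show get_hs_course s = get_hs_course_alt s
  unfold get_hs_course get_hs_course_alt
  exact aOuter_eq_bLoop _ 0
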